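-- pv_equiv track=rewrite | github.com/ZijiYu/ArtFlow | ablation/ablation_layers.py | normalize_order
-- ===== SOURCE A (Python) =====
-- MODULE_FLAG_MAP = {
--     "round_table_validation": "disable_round_table_validation",
--     "reflection_layer": "disable_reflection_layer",
--     "preception_layer": "disable_preception_layer",
--     "cot_layer": "disable_cot_layer",
-- }
--
-- def normalize_order(raw_order: object) -> list[str]:
--     if not isinstance(raw_order, list):
--         return list(MODULE_FLAG_MAP)
--     normalized: list[str] = []
--     for item in raw_order:
--         key = str(item or "").strip()
--         if key in MODULE_FLAG_MAP and key not in normalized: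
--             normalized.append(key)
--     for key in MODULE_FLAG_MAP:
--         if key not in normalized:
--             normalized.append(key)
--     return normalized
-- ===== SOURCE B (Python) =====
-- MODULE_FLAG_MAP = {
--     "round_table_validation": "disable_round_table_validation",
--     "reflection_layer": "disable_reflection_layer",
--     "preception_layer": "disable_preception_layer",
--     "cot_layer": "disable_cot_layer",
-- }
--
--
-- def normalize_order(raw_order: object) -> list[str]:
--     if not isinstance(raw_order, list):
--         return list(MODULE_FLAG_MAP)
--     keys = list(MODULE_FLAG_MAP)
--     norm = [str(item or "").strip() for item in raw_order]
--
--     def rank(k: str) -> int: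
--         first = norm.index(k) if k in norm else len(norm)
--         return first * len(keys) + keys.index(k)
--
--     return sorted(keys, key=rank)
-- ===== Notes on version B (the rewrite author's own statement) =====
-- stated objective: alternative
-- what changed: Replaces A's two sequential dedup/append loops with membership scans over the growing result by a rank function (first occurrence index of each map key among the stripped items, sentinel len for absent keys, map position as tie-break) and a single stable sort of the four map keys by that rank.
import Mathlib
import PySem

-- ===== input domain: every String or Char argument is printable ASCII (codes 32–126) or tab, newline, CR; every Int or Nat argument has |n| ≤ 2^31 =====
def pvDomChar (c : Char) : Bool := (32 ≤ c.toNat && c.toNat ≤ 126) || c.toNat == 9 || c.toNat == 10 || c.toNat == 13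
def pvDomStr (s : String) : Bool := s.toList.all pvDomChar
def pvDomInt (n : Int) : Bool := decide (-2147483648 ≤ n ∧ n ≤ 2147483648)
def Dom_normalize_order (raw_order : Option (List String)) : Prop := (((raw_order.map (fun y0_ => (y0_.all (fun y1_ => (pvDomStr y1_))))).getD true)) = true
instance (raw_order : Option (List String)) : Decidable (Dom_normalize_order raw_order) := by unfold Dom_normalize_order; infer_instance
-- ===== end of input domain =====

-- B replaces A's two dedup/append loops by one stable sort of the four map keys under a
-- first-occurrence rank (objective: alternative decomposition; return values proved equal).

-- ===== PORT A =====
-- module-level constant shared by both Python versions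
def MODULE_FLAG_MAP : List (String × String) :=
  [("round_table_validation", "disable_round_table_validation"),
   ("reflection_layer", "disable_reflection_layer"),
   ("preception_layer", "disable_preception_layer"),
   ("cot_layer", "disable_cot_layer")]

def normalize_order (raw_order : Option (List String)) : List String :=
  match raw_order with
  | none => MODULE_FLAG_MAP.map Prod.fst        -- not a list: list(MODULE_FLAG_MAP)
  | some xs =>
    -- first loop: keep stripped items that are map keys, first occurrence only
    let normalized := xs.foldl (fun normalized item =>
      let key := PySem.Str.strip (if item = "" then "" else item)   -- str(item or "").strip()
      if key ∈ MODULE_FLAG_MAP.map Prod.fst ∧ key ∉ normalized then normalized ++ [key]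
      else normalized) ([] : List String)
    -- second loop: append the missing map keys in map order
    (MODULE_FLAG_MAP.map Prod.fst).foldl (fun normalized key =>
      if key ∉ normalized then normalized ++ [key] else normalized) normalized

-- ===== PORT B =====
def normalize_order_alt (raw_order : Option (List String)) : List String :=
  match raw_order with
  | none => MODULE_FLAG_MAP.map Prod.fst
  | some xs =>
    let keys := MODULE_FLAG_MAP.map Prod.fst
    let norm := xs.map (fun item => PySem.Str.strip (if item = "" then "" else item))
    let rank : String → Int := fun k =>
      (if k ∈ norm then (((PySem.List.index? norm k).getD 0 : Nat) : Int)
       else (norm.length : Int)) * (keys.length : Int)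
      + (((PySem.List.index? keys k).getD 0 : Nat) : Int)
    PySem.List.sorted keys rank

-- ===== PRECONDITION & SPEC =====
def Spec_normalize_order (raw_order : Option (List String)) (out : List String) : Prop := out = normalize_order_alt raw_order
instance (raw_order : Option (List String)) (out : List String) : Decidable (Spec_normalize_order raw_order out) := by unfold Spec_normalize_order; infer_instance

-- ===== CLAIM (what is proved, stated in full; the proofs are below) =====
def Claim_equal_normalize_order : Prop := ∀ (raw_order : Option (List String)), Dom_normalize_order raw_order → Spec_normalize_order raw_order (normalize_order raw_order)

-- ===== LEMMAS AND PROOFS =====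

-- the four map keys, as a literal list
def pvK : List String :=
  ["round_table_validation", "reflection_layer", "preception_layer", "cot_layer"]

theorem pvK_eq : MODULE_FLAG_MAP.map Prod.fst = pvK := rfl

-- first-occurrence dedup of the keys of pvK appearing in a list (structural form of A's first loop)
def pvG : List String → List String
  | [] => []
  | x :: t => if x ∈ pvK then x :: (pvG t).filter (fun y => y != x) else pvG t

theorem mem_pvG {y : String} : ∀ {t : List String}, y ∈ pvG t ↔ y ∈ pvK ∧ y ∈ t := by
  intro t
  induction t with
  | nil => simp [pvG]
  | cons x t ih =>
    by_cases hx : x ∈ pvK <;>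
      simp [pvG, hx, List.mem_filter, ih] <;> by_cases hyx : y = x <;> simp [hyx, hx]

theorem nodup_pvG : ∀ (t : List String), (pvG t).Nodup := by
  intro t
  induction t with
  | nil => simp [pvG]
  | cons x t ih =>
    by_cases hx : x ∈ pvK
    · simp only [pvG, if_pos hx, List.nodup_cons]
      refine ⟨fun h => ?_, ih.filter _⟩
      have := (List.mem_filter.mp h).2
      simp at this
    · simpa only [pvG, if_neg hx] using ih

theorem pairwise_idx_pvG : ∀ (t : List String),
    (pvG t).Pairwise (fun a b => t.idxOf a < t.idxOf b) := by
  intro t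
  induction t with
  | nil => simp [pvG]
  | cons x t ih =>
    by_cases hx : x ∈ pvK
    · simp only [pvG, if_pos hx, List.pairwise_cons]
      constructor
      · intro b hb
        have hbx : b ≠ x := by simpa using (List.mem_filter.mp hb).2
        simp [List.idxOf_cons_self, List.idxOf_cons_ne _ (Ne.symm hbx)]
      · refine ((List.pairwise_filter).mpr ?_)
        refine ih.imp_of_mem ?_
        intro a b ha hb h hax hbx
        have hax' : a ≠ x := by simpa using hax
        have hbx' : b ≠ x := by simpa using hbx
        simp [List.idxOf_cons_ne _ (Ne.symm hax'), List.idxOf_cons_ne _ (Ne.symm hbx')]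
        omega
    · simp only [pvG, if_neg hx]
      refine ih.imp_of_mem ?_
      intro a b ha hb h
      have hat : a ∈ t := (mem_pvG.mp ha).2
      have hax : a ≠ x := by rintro rfl; exact hx (mem_pvG.mp ha).1
      have hbx : b ≠ x := by rintro rfl; exact hx (mem_pvG.mp hb).1
      simp [List.idxOf_cons_ne _ (Ne.symm hax), List.idxOf_cons_ne _ (Ne.symm hbx)]
      omega

-- A's first loop computes pvG, relative to any accumulator
theorem fold1_eq : ∀ (t acc : List String),
    t.foldl (fun acc x => if x ∈ pvK ∧ x ∉ acc then acc ++ [x] else acc) acc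
      = acc ++ (pvG t).filter (fun y => decide (y ∉ acc)) := by
  intro t
  induction t with
  | nil => intro acc; simp [pvG]
  | cons x t ih =>
    intro acc
    by_cases hx : x ∈ pvK
    · by_cases hacc : x ∈ acc
      · have : (if x ∈ pvK ∧ x ∉ acc then acc ++ [x] else acc) = acc := by
          simp [hacc]
        rw [List.foldl_cons, this, ih]
        simp only [pvG, hx, if_pos, List.filter_cons]
        have hxd : decide (x ∉ acc) = false := by simp [hacc]
        rw [hxd]
        simp only [List.filter_filter]
        congr 1
        apply List.filter_congr
        intro y _
        by_cases hy : y ∈ acc <;> by_cases hyx : y = x <;> simp_all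
      · have : (if x ∈ pvK ∧ x ∉ acc then acc ++ [x] else acc) = acc ++ [x] := by
          simp [hx, hacc]
        rw [List.foldl_cons, this, ih]
        simp only [pvG, hx, if_pos, List.filter_cons]
        have hxd : decide (x ∉ acc) = true := by simp [hacc]
        rw [hxd]
        simp only [List.filter_filter, List.append_assoc, List.cons_append,
          List.nil_append]
        congr 2
        apply List.filter_congr
        intro y _
        by_cases hy : y ∈ acc <;> by_cases hyx : y = x <;> simp_all
    · have : (if x ∈ pvK ∧ x ∉ acc then acc ++ [x] else acc) = acc := by simp [hx]
      rw [List.foldl_cons, this, ih]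
      simp [pvG, hx]

-- A's second loop appends the missing keys, for a duplicate-free key list
theorem fold2_eq : ∀ (L : List String), L.Pairwise (· ≠ ·) → ∀ (acc : List String),
    L.foldl (fun acc k => if k ∉ acc then acc ++ [k] else acc) acc
      = acc ++ L.filter (fun k => decide (k ∉ acc)) := by
  intro L
  induction L with
  | nil => intro _ acc; simp
  | cons x t ih =>
    intro hp acc
    have hne : ∀ b ∈ t, x ≠ b := (List.pairwise_cons.mp hp).1
    have hpt := (List.pairwise_cons.mp hp).2
    by_cases hacc : x ∈ acc
    · rw [List.foldl_cons]
      simp only [hacc, not_true, ite_false]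
      rw [ih hpt acc]
      simp [hacc]
    · rw [List.foldl_cons]
      simp only [hacc, not_false_iff, ite_true]
      rw [ih hpt (acc ++ [x])]
      simp only [List.filter_cons, hacc]
      simp only [not_false_iff, decide_true, List.append_assoc, List.singleton_append]
      congr 2
      apply List.filter_congr
      intro y hy
      have : y ≠ x := fun h => (hne y hy) h.symm
      simp [this]


-- bridge: list.index of a member equals idxOf
theorem index?_getD_of_mem : ∀ {l : List String} {a : String}, a ∈ l →
    (PySem.List.index? l a).getD 0 = l.idxOf a := by
  intro l
  induction l with
  | nil => intro a ha; simp at ha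
  | cons x t ih =>
    intro a ha
    by_cases h : x = a
    · subst h; rw [PySem.List.index?_cons_self]; simp
    · have ha' : a ∈ t := by
        rcases List.mem_cons.mp ha with h' | h'
        · exact absurd h'.symm h
        · exact h'
      rw [PySem.List.index?_cons_of_ne _ h]
      have hih := ih ha'
      cases hcase : PySem.List.index? t a with
      | none =>
        rw [PySem.List.index?_eq_idxOf?] at hcase
        exact absurd (List.idxOf?_eq_none_iff.mp hcase) (not_not.mpr ha')
      | some i =>
        rw [hcase] at hih
        simp only [Option.map_some, Option.getD_some] at hih ⊢
        rw [List.idxOf_cons_ne _ h]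
        omega

-- the rank B sorts by (norm = the stripped raw items)
def pvRank (norm : List String) (k : String) : Int :=
  (if k ∈ norm then (((PySem.List.index? norm k).getD 0 : Nat) : Int)
   else (norm.length : Int)) * ((pvK.length : Nat) : Int)
  + (((PySem.List.index? pvK k).getD 0 : Nat) : Int)

theorem pvPos_lt : ∀ k ∈ pvK, ((PySem.List.index? pvK k).getD 0) < 4 := by decide

theorem pvK_pairwise_ne : pvK.Pairwise (· ≠ ·) := by decide

theorem pvK_pairwise_pos : pvK.Pairwise
    (fun a b => ((PySem.List.index? pvK a).getD 0) < ((PySem.List.index? pvK b).getD 0)) := by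
  decide

theorem pvRank_mem {norm : List String} {k : String} (hk : k ∈ norm) :
    pvRank norm k = (norm.idxOf k : Int) * 4 + (((PySem.List.index? pvK k).getD 0 : Nat) : Int) := by
  simp only [pvRank, if_pos hk, index?_getD_of_mem hk]
  norm_num [pvK]

theorem pvRank_not_mem {norm : List String} {k : String} (hk : k ∉ norm) :
    pvRank norm k = (norm.length : Int) * 4 + (((PySem.List.index? pvK k).getD 0 : Nat) : Int) := by
  simp only [pvRank, if_neg hk]
  norm_num [pvK]

-- the claimed sorted order: present keys by first occurrence, then missing keys in map order
theorem perm_main (norm : List String) :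
    (pvG norm ++ pvK.filter (fun k => decide (k ∉ pvG norm))).Perm pvK := by
  have hNd : (pvG norm).Nodup := nodup_pvG norm
  have hKd : pvK.Nodup := by decide
  have hys : (pvG norm ++ pvK.filter (fun k => decide (k ∉ pvG norm))).Nodup := by
    refine List.Nodup.append hNd (hKd.filter _) ?_
    intro a ha hb
    have := (List.mem_filter.mp hb).2
    simp at this
    exact this ha
  refine (List.perm_ext_iff_of_nodup hys hKd).mpr ?_
  intro a
  simp only [List.mem_append, List.mem_filter, decide_eq_true_eq]
  constructor
  · rintro (h | ⟨h, _⟩)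
    · exact (mem_pvG.mp h).1
    · exact h
  · intro h
    by_cases hN : a ∈ pvG norm
    · exact Or.inl hN
    · exact Or.inr ⟨h, by simpa using hN⟩

theorem pw_main (norm : List String) :
    (pvG norm ++ pvK.filter (fun k => decide (k ∉ pvG norm))).Pairwise
      (fun a b => pvRank norm a < pvRank norm b) := by
  rw [List.pairwise_append]
  refine ⟨?_, ?_, ?_⟩
  · -- inside pvG norm: strictly increasing first-occurrence index
    refine (pairwise_idx_pvG norm).imp_of_mem ?_
    intro a b ha hb h
    have haK := mem_pvG.mp ha
    have hbK := mem_pvG.mp hb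
    rw [pvRank_mem haK.2, pvRank_mem hbK.2]
    have hpa := pvPos_lt a haK.1
    have hpb := pvPos_lt b hbK.1
    omega
  · -- inside the missing part: map order
    refine ((pvK_pairwise_pos.sublist List.filter_sublist).imp_of_mem ?_)
    intro a b ha hb h
    have haf := List.mem_filter.mp ha
    have hbf := List.mem_filter.mp hb
    have haN : a ∉ norm := by
      intro hm
      have h2 := haf.2
      simp only [decide_eq_true_eq] at h2
      exact h2 (mem_pvG.mpr ⟨haf.1, hm⟩)
    have hbN : b ∉ norm := by
      intro hm
      have h2 := hbf.2
      simp only [decide_eq_true_eq] at h2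
      exact h2 (mem_pvG.mpr ⟨hbf.1, hm⟩)
    rw [pvRank_not_mem haN, pvRank_not_mem hbN]
    omega
  · -- cross: every present key precedes every missing key
    intro a ha b hb
    have haK := mem_pvG.mp ha
    have hbf := List.mem_filter.mp hb
    have hbN : b ∉ norm := by
      intro hm
      have h2 := hbf.2
      simp only [decide_eq_true_eq] at h2
      exact h2 (mem_pvG.mpr ⟨hbf.1, hm⟩)
    rw [pvRank_mem haK.2, pvRank_not_mem hbN]
    have hia := List.idxOf_lt_length_of_mem haK.2
    have hpa := pvPos_lt a haK.1
    have hpb := pvPos_lt b hbf.1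
    omega

theorem some_case (xs : List String) :
    normalize_order (some xs) = normalize_order_alt (some xs) := by
  have hstep :
      xs.foldl (fun normalized item =>
        let key := PySem.Str.strip (if item = "" then "" else item)
        if key ∈ MODULE_FLAG_MAP.map Prod.fst ∧ key ∉ normalized then normalized ++ [key]
        else normalized) ([] : List String)
      = (xs.map (fun item => PySem.Str.strip (if item = "" then "" else item))).foldl
          (fun acc k => if k ∈ pvK ∧ k ∉ acc then acc ++ [k] else acc) [] := by
    rw [List.foldl_map]
    rfl
  have hB : normalize_order_alt (some xs)
      = PySem.List.sorted pvK (pvRank (xs.map (fun item => PySem.Str.strip (if item = "" then "" else item)))) := rfl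
  set norm := xs.map (fun item => PySem.Str.strip (if item = "" then "" else item)) with hnorm
  rw [hB, PySem.List.sorted_eq_of_perm_of_pairwise_lt pvK _ (pvRank norm) (perm_main norm) (pw_main norm)]
  show (MODULE_FLAG_MAP.map Prod.fst).foldl
      (fun normalized key => if key ∉ normalized then normalized ++ [key] else normalized)
      (xs.foldl (fun normalized item =>
        let key := PySem.Str.strip (if item = "" then "" else item)
        if key ∈ MODULE_FLAG_MAP.map Prod.fst ∧ key ∉ normalized then normalized ++ [key]
        else normalized) ([] : List String)) = _
  rw [hstep, fold1_eq]
  have h0 : (pvG norm).filter (fun y => decide (y ∉ ([] : List String))) = pvG norm := by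
    simp
  rw [List.nil_append, h0, pvK_eq, fold2_eq pvK pvK_pairwise_ne]

-- ===== VERDICT (by name: the statement is the Claim_ definition above) =====
theorem normalize_order_spec : Claim_equal_normalize_order := by
  intro raw_order _
  unfold Spec_normalize_order
  cases raw_order with
  | none => rfl
  | some xs => exact some_case xs
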